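-- pv_equiv track=rewrite | github.com/klarra247/AlgorithmStudy | 프로그래머스/3/81303. 표 편집/표 편집.py | solution
-- ===== SOURCE A (Python) =====
-- def solution(n, k, cmd):
--     answer = ['O'] * n
--     stack = []
--     linked_list = {i: [i-1, i+1] for i in range(n)}
--     linked_list[0] = [-1, 1]
--     linked_list[n-1] = [n-2, -1]
--
--     for action in cmd:
--         if action[0] == 'D':
--             x = int(action.split()[1])
--             for _ in range(x):
--                 k = linked_list[k][1]
--
--         elif action[0] == 'U':
--             x = int(action.split()[1])
--             for _ in range(x):
--                 k = linked_list[k][0]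
--
--         elif action[0] == 'C':
--             answer[k] = 'X'
--             prev, next = linked_list[k]
--             stack.append([k, prev, next])
--
--             if prev != -1:
--                 linked_list[prev][1] = next
--             if next != -1:
--                 linked_list[next][0] = prev
--                 k = next
--             else:
--                 k = prev
--
--         elif action[0] == 'Z':
--             idx, prev, next = stack.pop()
--             answer[idx] = 'O'
--
--             if prev != -1:
--                 linked_list[prev][1] = idx
--             if next != -1:
--                 linked_list[next][0] = idx
--             linked_list[idx] = [prev, next]
--
--     return ''.join(answer)
-- ===== SOURCE B (Python) =====
-- # B: same table editor, but no doubly-linked pointer dict: keep the original integer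
-- # indices, a `deleted` set and a stack of deleted indices; cursor moves scan the raw
-- # indices skipping deleted ones.
-- def solution(n, k, cmd):
--     answer = ['O'] * n
--     deleted = set()
--     stack = []
--
--     def nxt(i):
--         j = i + 1
--         while j < n and j in deleted:
--             j += 1
--         return j if j < n else -1
--
--     def prv(i):
--         j = i - 1
--         while j >= 0 and j in deleted:
--             j -= 1
--         return j if j >= 0 else -1
--
--     for action in cmd:
--         c = action[0]
--         if c == 'D':
--             for _ in range(int(action.split()[1])):
--                 k = nxt(k)
--         elif c == 'U':
--             for _ in range(int(action.split()[1])):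
--                 k = prv(k)
--         elif c == 'C':
--             answer[k] = 'X'
--             stack.append(k)
--             deleted.add(k)
--             nk = nxt(k)
--             k = nk if nk != -1 else prv(k)
--         elif c == 'Z':
--             idx = stack.pop()
--             answer[idx] = 'O'
--             deleted.discard(idx)
--     return ''.join(answer)
-- ===== Notes on version B (the rewrite author's own statement) =====
-- stated objective: simpler
-- what changed: A maintains a doubly-linked list as a dict of [prev,next] pointer pairs built for all n rows and patched on every delete/restore; B keeps only a set of deleted indices plus a stack of them, moves the cursor by scanning raw indices while skipping deleted ones, and restores by removing the popped index from the set.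
-- outside the precondition, e.g. on solution(0, 0, ['D 1']): A returns '', B returns ''; on solution(-2, 0, ['U 1']): A returns '', B returns ''
import Mathlib
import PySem

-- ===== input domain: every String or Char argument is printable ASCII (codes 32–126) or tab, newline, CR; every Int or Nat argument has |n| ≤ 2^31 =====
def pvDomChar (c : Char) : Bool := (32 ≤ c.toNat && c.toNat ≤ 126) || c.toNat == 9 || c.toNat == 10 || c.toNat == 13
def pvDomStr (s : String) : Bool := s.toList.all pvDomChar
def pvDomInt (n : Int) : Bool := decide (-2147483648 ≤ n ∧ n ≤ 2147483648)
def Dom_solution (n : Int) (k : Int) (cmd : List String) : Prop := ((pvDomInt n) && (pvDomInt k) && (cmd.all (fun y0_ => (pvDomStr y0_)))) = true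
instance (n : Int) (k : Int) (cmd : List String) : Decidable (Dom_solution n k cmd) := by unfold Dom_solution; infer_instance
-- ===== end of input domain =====

-- B replaces A's doubly-linked pointer dictionary by a deleted-set with index scans:
-- objective 'simpler' (return value only; neither version mutates its arguments).

-- ===== PORT A =====
def aParse (action : String) : Option Int :=
  match (PySem.Str.split₀ action)[1]? with
  | none => none
  | some t => PySem.Int.ofStr? t

structure AState where
  ans : List String
  cur : Int
  ll  : PySem.Dict Int (Int × Int)
  stk : List (Int × Int × Int)

def aStep (s : AState) (action : String) : AState :=
  match action.toList with
  | [] => s                 -- action[0]: IndexError, excluded by Pre_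
  | ch :: _ =>
    if ch = 'D' then
      match aParse action with
      | none => s           -- int(action.split()[1]) raises, excluded by Pre_
      | some x =>
        { s with cur := (PySem.List.pyRange 0 x 1).foldl (fun kk _ => (s.ll.getD kk (0, 0)).2) s.cur }
    else if ch = 'U' then
      match aParse action with
      | none => s
      | some x =>
        { s with cur := (PySem.List.pyRange 0 x 1).foldl (fun kk _ => (s.ll.getD kk (0, 0)).1) s.cur }
    else if ch = 'C' then
      let pn := s.ll.getD s.cur (0, 0)
      let ll1 := if pn.1 ≠ -1 then s.ll.modify pn.1 (0, 0) (fun pr => (pr.1, pn.2)) else s.ll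
      let ll2 := if pn.2 ≠ -1 then ll1.modify pn.2 (0, 0) (fun pr => (pn.1, pr.2)) else ll1
      { ans := PySem.List.pySetD s.ans s.cur "X",
        cur := if pn.2 ≠ -1 then pn.2 else pn.1,
        ll := ll2,
        stk := s.stk ++ [(s.cur, pn.1, pn.2)] }
    else if ch = 'Z' then
      match PySem.List.pop? s.stk (-1) with
      | none => s           -- pop from empty stack raises, excluded by Pre_
      | some ((idx, prev, next), rest) =>
        let ll1 := if prev ≠ -1 then s.ll.modify prev (0, 0) (fun pr => (pr.1, idx)) else s.ll
        let ll2 := if next ≠ -1 then ll1.modify next (0, 0) (fun pr => (idx, pr.2)) else ll1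
        { ans := PySem.List.pySetD s.ans idx "O",
          cur := s.cur,
          ll := ll2.insert idx (prev, next),
          stk := rest }
    else s

def aInitLL (n : Int) : PySem.Dict Int (Int × Int) :=
  (((PySem.List.pyRange 0 n 1).foldl (fun d i => d.insert i (i - 1, i + 1))
      (PySem.Dict.mk [])).insert 0 (-1, 1)).insert (n - 1) (n - 2, -1)

def solution (n : Int) (k : Int) (cmd : List String) : String :=
  PySem.Str.join "" (cmd.foldl aStep ⟨PySem.List.pyRepeat ["O"] n, k, aInitLL n, []⟩).ans

-- ===== PORT B =====
def bParse (action : String) : Option Int :=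
  ((PySem.Str.split₀ action)[1]?).bind PySem.Int.ofStr?

def bScanUp (n : Int) (del : PySem.Set Int) : Nat → Int → Int
  | 0, j => if j < n then j else -1
  | fuel + 1, j => if j < n && del.contains j then bScanUp n del fuel (j + 1) else if j < n then j else -1

def bNext (n : Int) (del : PySem.Set Int) (i : Int) : Int := bScanUp n del (n - (i + 1)).toNat (i + 1)

def bScanDown (del : PySem.Set Int) : Nat → Int → Int
  | 0, j => if 0 ≤ j then j else -1
  | fuel + 1, j => if 0 ≤ j && del.contains j then bScanDown del fuel (j - 1) else if 0 ≤ j then j else -1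

def bPrev (del : PySem.Set Int) (i : Int) : Int := bScanDown del i.toNat (i - 1)

structure BState where
  ans : List String
  cur : Int
  del : PySem.Set Int
  stk : List Int

def bStep (n : Int) (s : BState) (action : String) : BState :=
  match action.toList with
  | [] => s                 -- action[0]: IndexError, excluded by Pre_
  | ch :: _ =>
    if ch = 'D' then
      match bParse action with
      | none => s
      | some x =>
        { s with cur := (PySem.List.pyRange 0 x 1).foldl (fun kk _ => bNext n s.del kk) s.cur }
    else if ch = 'U' then
      match bParse action with
      | none => s
      | some x =>
        { s with cur := (PySem.List.pyRange 0 x 1).foldl (fun kk _ => bPrev s.del kk) s.cur }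
    else if ch = 'C' then
      let del' := s.del.add s.cur
      let nk := bNext n del' s.cur
      { ans := PySem.List.pySetD s.ans s.cur "X",
        cur := if nk ≠ -1 then nk else bPrev del' s.cur,
        del := del',
        stk := s.stk ++ [s.cur] }
    else if ch = 'Z' then
      match PySem.List.pop? s.stk (-1) with
      | none => s
      | some (idx, rest) =>
        { ans := PySem.List.pySetD s.ans idx "O",
          cur := s.cur,
          del := s.del.discard idx,
          stk := rest }
    else s

def solution_alt (n : Int) (k : Int) (cmd : List String) : String :=
  PySem.Str.join "" (cmd.foldl (bStep n) ⟨PySem.List.pyRepeat ["O"] n, k, PySem.Set.empty, []⟩).ans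

-- ===== PRECONDITION & SPEC =====
-- The live indices above / below i (ascending resp. descending), used by the validity checker.
def liveAbove (n : Int) (del : List Int) (i : Int) : List Int :=
  (PySem.List.pyRange (i + 1) n 1).filter (fun t => !(del.contains t))

def liveBelow (del : List Int) (i : Int) : List Int :=
  (PySem.List.pyRange (i - 1) (-1) (-1)).filter (fun t => !(del.contains t))

def chkParse (action : String) : Option Int :=
  match PySem.Str.split₀ action with
  | _ :: t :: _ => PySem.Int.ofStr? t
  | _ => none

-- One command of A executes without an exception iff chkStep returns the next checker state.
def chkStep (n : Int) (st : Int × List Int × List Int) (action : String) : Option (Int × List Int × List Int) :=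
  match action.toList with
  | [] => none
  | ch :: _ =>
    if ch = 'D' then
      match chkParse action with
      | none => none
      | some x =>
        if x ≤ 0 then some st
        else if 0 ≤ st.1 ∧ st.1 < n then
          let L := liveAbove n st.2.1 st.1
          if x ≤ L.length then some (L.getD (x - 1).toNat (-1), st.2.1, st.2.2)
          else if x = L.length + 1 then some (-1, st.2.1, st.2.2)
          else none
        else none
    else if ch = 'U' then
      match chkParse action with
      | none => none
      | some x =>
        if x ≤ 0 then some st
        else if 0 ≤ st.1 ∧ st.1 < n then
          let L := liveBelow st.2.1 st.1
          if x ≤ L.length then some (L.getD (x - 1).toNat (-1), st.2.1, st.2.2)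
          else if x = L.length + 1 then some (-1, st.2.1, st.2.2)
          else none
        else none
    else if ch = 'C' then
      if 0 ≤ st.1 ∧ st.1 < n ∧ st.1 ∉ st.2.1 then
        let del' := PySem.Set.add st.2.1 st.1
        let nk := (liveAbove n del' st.1).headD (-1)
        some (if nk ≠ -1 then nk else (liveBelow del' st.1).headD (-1), del', st.2.2 ++ [st.1])
      else none
    else if ch = 'Z' then
      match PySem.List.pop? st.2.2 (-1) with
      | none => none
      | some (idx, rest) => some (st.1, PySem.Set.discard st.2.1 idx, rest)
    else some st

def chkRun (n : Int) : (Int × List Int × List Int) → List String → Bool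
  | _, [] => true
  | st, c :: rest =>
    match chkStep n st c with
    | none => false
    | some st' => chkRun n st' rest

def noOps (cmd : List String) : Bool :=
  cmd.all (fun c =>
    match c.toList with
    | [] => false
    | ch :: _ => !(ch = 'D' || ch = 'U' || ch = 'C' || ch = 'Z'))

-- Pre_ excludes exactly the inputs on which A raises (IndexError/KeyError/ValueError on a
-- malformed command, a cursor move past the ends, deleting at an invalid cursor, or undo with
-- an empty stack); for degenerate tables (n ≤ 0 or a cursor outside the table) it conservatively
-- admits only command lists that never touch the cursor, thereby also excluding a few inputs on
-- which A still returns only because its pointer dictionary accidentally keeps entries 0 and n-1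
-- (there A returns the same all-'O' string B returns).
def Pre_solution (n : Int) (k : Int) (cmd : List String) : Prop :=
  noOps cmd = true ∨ (1 ≤ n ∧ 0 ≤ k ∧ k < n ∧ chkRun n (k, ([], [])) cmd = true)

instance (n : Int) (k : Int) (cmd : List String) : Decidable (Pre_solution n k cmd) := by
  unfold Pre_solution; infer_instance

def pvWitness_solution : Int × Int × List String := (8, 2, ["D 2", "C", "U 3", "C", "Z", "D 4", "C"])

def Spec_solution (n : Int) (k : Int) (cmd : List String) (out : String) : Prop := out = solution_alt n k cmd
instance (n : Int) (k : Int) (cmd : List String) (out : String) : Decidable (Spec_solution n k cmd out) := by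
  unfold Spec_solution; infer_instance

-- ===== CLAIM (what is proved, stated in full; the proofs are below) =====
def Claim_equal_solution : Prop := ∀ (n : Int) (k : Int) (cmd : List String), Dom_solution n k cmd → Pre_solution n k cmd → Spec_solution n k cmd (solution n k cmd)

-- ===== LEMMAS AND PROOFS =====

-- the canonical "next/previous live index" values the checker computes
def nxtL (n : Int) (del : List Int) (i : Int) : Int := (liveAbove n del i).headD (-1)
def prvL (del : List Int) (i : Int) : Int := (liveBelow del i).headD (-1)

-- A's stack entries store, level by level, the live-neighbour pair of the deleted index
-- with respect to the deleted set as it was when that index was deleted.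
def StackRel (n : Int) : List Int → List (Int × Int × Int) → List Int → Prop
  | _, [], [] => True
  | del, t :: ta, i :: tb =>
      t = (i, prvL (PySem.Set.discard del i) i, nxtL n (PySem.Set.discard del i) i) ∧
      i ∈ del ∧ StackRel n (PySem.Set.discard del i) ta tb
  | _, _, _ => False

def InvAB (n : Int) (sa : AState) (sb : BState) (st : Int × List Int × List Int) : Prop :=
  sa.ans = sb.ans ∧ sa.cur = st.1 ∧ sb.cur = st.1 ∧ sb.del = st.2.1 ∧ sb.stk = st.2.2 ∧
  (∀ j ∈ st.2.1, 0 ≤ j ∧ j < n) ∧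
  (st.1 = -1 ∨ (0 ≤ st.1 ∧ st.1 < n ∧ st.1 ∉ st.2.1)) ∧
  (∀ i : Int, 0 ≤ i → i < n → i ∉ st.2.1 → sa.ll.get? i = some (prvL st.2.1 i, nxtL n st.2.1 i)) ∧
  StackRel n st.2.1 sa.stk.reverse sb.stk.reverse

lemma foldl_const_iterate (l : List Int) (g : Int → Int) (init : Int) :
    l.foldl (fun s _ => g s) init = g^[l.length] init := by
  induction l generalizing init with
  | nil => rfl
  | cons a t ih => simp [List.foldl_cons, ih, Function.iterate_succ_apply]

lemma mem_liveAbove {n : Int} {del : List Int} {i t : Int} :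
    t ∈ liveAbove n del i ↔ i < t ∧ t < n ∧ t ∉ del := by
  simp [liveAbove, List.mem_filter, PySem.List.mem_pyRange_one]; tauto

lemma mem_liveBelow {del : List Int} {i t : Int} :
    t ∈ liveBelow del i ↔ 0 ≤ t ∧ t < i ∧ t ∉ del := by
  simp [liveBelow, PySem.List.pyRange_neg_one_eq_reverse, List.mem_filter,
        PySem.List.mem_pyRange_one]; tauto

lemma upSpecAux (n : Int) (del : List Int) :
    ∀ (f : Nat) (a : Int), (n - a).toNat ≤ f →
    ((((PySem.List.pyRange a n 1).filter (fun t => !(del.contains t))).headD (-1) = -1 ∧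
       ∀ t, a ≤ t → t < n → t ∈ del) ∨
    (let r := ((PySem.List.pyRange a n 1).filter (fun t => !(del.contains t))).headD (-1)
     a ≤ r ∧ r < n ∧ r ∉ del ∧ ∀ t, a ≤ t → t < r → t ∈ del)) := by
  intro f
  induction f with
  | zero =>
    intro a h
    rw [PySem.List.pyRange_one_eq_nil (by omega : n ≤ a)]
    exact Or.inl ⟨rfl, fun t ht1 ht2 => ((by omega : False).elim)⟩
  | succ f ih =>
    intro a h
    by_cases han : n ≤ a
    · rw [PySem.List.pyRange_one_eq_nil han]
      exact Or.inl ⟨rfl, fun t ht1 ht2 => ((by omega : False).elim)⟩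
    · rw [PySem.List.pyRange_one_cons (by omega : a < n)]
      by_cases hmem : a ∈ del
      · rw [List.filter_cons_of_neg (by simp [hmem])]
        rcases ih (a + 1) (by omega) with ⟨h1, h2⟩ | ⟨h1, h2, h3, h4⟩
        · exact Or.inl ⟨h1, fun t ht1 ht2 => by
            rcases eq_or_lt_of_le ht1 with he | hl
            · exact he ▸ hmem
            · exact h2 t (by omega) ht2⟩
        · refine Or.inr ⟨by omega, h2, h3, fun t ht1 ht2 => ?_⟩
          rcases eq_or_lt_of_le ht1 with he | hl
          · exact he ▸ hmem
          · exact h4 t (by omega) ht2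
      · rw [List.filter_cons_of_pos (by simp [hmem])]
        refine Or.inr ?_
        simp only [List.headD_cons]
        exact ⟨le_refl a, by omega, hmem, fun t ht1 ht2 => ((by omega : False).elim)⟩

lemma upSpec (n : Int) (del : List Int) (a : Int) :
    (((PySem.List.pyRange a n 1).filter (fun t => !(del.contains t))).headD (-1) = -1 ∧
       ∀ t, a ≤ t → t < n → t ∈ del) ∨
    (let r := ((PySem.List.pyRange a n 1).filter (fun t => !(del.contains t))).headD (-1)
     a ≤ r ∧ r < n ∧ r ∉ del ∧ ∀ t, a ≤ t → t < r → t ∈ del) :=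
  upSpecAux n del (n - a).toNat a le_rfl

lemma downSpecAux (del : List Int) :
    ∀ (f : Nat) (a : Int), (a + 1).toNat ≤ f →
    ((((PySem.List.pyRange a (-1) (-1)).filter (fun t => !(del.contains t))).headD (-1) = -1 ∧
       ∀ t, 0 ≤ t → t ≤ a → t ∈ del) ∨
    (let r := ((PySem.List.pyRange a (-1) (-1)).filter (fun t => !(del.contains t))).headD (-1)
     0 ≤ r ∧ r ≤ a ∧ r ∉ del ∧ ∀ t, r < t → t ≤ a → t ∈ del)) := by
  intro f
  induction f with
  | zero =>
    intro a h
    rw [PySem.List.pyRange_neg_one_eq_nil (by omega : a ≤ -1)]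
    exact Or.inl ⟨rfl, fun t ht1 ht2 => ((by omega : False).elim)⟩
  | succ f ih =>
    intro a h
    by_cases han : a ≤ -1
    · rw [PySem.List.pyRange_neg_one_eq_nil han]
      exact Or.inl ⟨rfl, fun t ht1 ht2 => ((by omega : False).elim)⟩
    · rw [PySem.List.pyRange_neg_one_cons (by omega : (-1 : Int) < a)]
      by_cases hmem : a ∈ del
      · rw [List.filter_cons_of_neg (by simp [hmem])]
        rcases ih (a - 1) (by omega) with ⟨h1, h2⟩ | ⟨h1, h2, h3, h4⟩
        · exact Or.inl ⟨h1, fun t ht1 ht2 => by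
            rcases eq_or_lt_of_le ht2 with he | hl
            · exact he ▸ hmem
            · exact h2 t ht1 (by omega)⟩
        · refine Or.inr ⟨h1, by omega, h3, fun t ht1 ht2 => ?_⟩
          rcases eq_or_lt_of_le ht2 with he | hl
          · exact he ▸ hmem
          · exact h4 t ht1 (by omega)
      · rw [List.filter_cons_of_pos (by simp [hmem])]
        refine Or.inr ?_
        simp only [List.headD_cons]
        exact ⟨by omega, le_refl a, hmem, fun t ht1 ht2 => ((by omega : False).elim)⟩

lemma downSpec (del : List Int) (a : Int) :
    (((PySem.List.pyRange a (-1) (-1)).filter (fun t => !(del.contains t))).headD (-1) = -1 ∧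
       ∀ t, 0 ≤ t → t ≤ a → t ∈ del) ∨
    (let r := ((PySem.List.pyRange a (-1) (-1)).filter (fun t => !(del.contains t))).headD (-1)
     0 ≤ r ∧ r ≤ a ∧ r ∉ del ∧ ∀ t, r < t → t ≤ a → t ∈ del) :=
  downSpecAux del (a + 1).toNat a le_rfl

lemma nxtL_spec (n : Int) (del : List Int) (i : Int) :
    (nxtL n del i = -1 ∧ ∀ t, i < t → t < n → t ∈ del) ∨
    (i < nxtL n del i ∧ nxtL n del i < n ∧ nxtL n del i ∉ del ∧
       ∀ t, i < t → t < nxtL n del i → t ∈ del) := by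
  have h := upSpec n del (i + 1)
  simp only [nxtL, liveAbove] at *
  rcases h with ⟨h1, h2⟩ | ⟨h1, h2, h3, h4⟩
  · exact Or.inl ⟨h1, fun t ht1 ht2 => h2 t (by omega) ht2⟩
  · exact Or.inr ⟨by omega, h2, h3, fun t ht1 ht2 => h4 t (by omega) ht2⟩

lemma prvL_spec (del : List Int) (i : Int) :
    (prvL del i = -1 ∧ ∀ t, 0 ≤ t → t < i → t ∈ del) ∨
    (0 ≤ prvL del i ∧ prvL del i < i ∧ prvL del i ∉ del ∧
       ∀ t, prvL del i < t → t < i → t ∈ del) := by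
  have h := downSpec del (i - 1)
  simp only [prvL, liveBelow] at *
  rcases h with ⟨h1, h2⟩ | ⟨h1, h2, h3, h4⟩
  · exact Or.inl ⟨h1, fun t ht1 ht2 => h2 t ht1 (by omega)⟩
  · exact Or.inr ⟨h1, by omega, h3, fun t ht1 ht2 => h4 t ht1 (by omega)⟩

lemma nxtL_eq_of {n : Int} {del : List Int} {i j : Int} (hij : i < j) (hjn : j < n)
    (hj : j ∉ del) (hb : ∀ t, i < t → t < j → t ∈ del) : nxtL n del i = j := by
  rcases nxtL_spec n del i with ⟨h1, h2⟩ | ⟨h1, h2, h3, h4⟩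
  · exact absurd (h2 j hij hjn) hj
  · by_cases hlt : nxtL n del i < j
    · exact absurd (hb _ h1 hlt) h3
    · by_cases hgt : j < nxtL n del i
      · exact absurd (h4 j hij hgt) hj
      · omega

lemma nxtL_eq_neg_one {n : Int} {del : List Int} {i : Int}
    (h : ∀ t, i < t → t < n → t ∈ del) : nxtL n del i = -1 := by
  rcases nxtL_spec n del i with ⟨h1, _⟩ | ⟨h1, h2, h3, _⟩
  · exact h1
  · exact absurd (h _ h1 h2) h3

lemma prvL_eq_of {del : List Int} {i j : Int} (h0 : 0 ≤ j) (hij : j < i)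
    (hj : j ∉ del) (hb : ∀ t, j < t → t < i → t ∈ del) : prvL del i = j := by
  rcases prvL_spec del i with ⟨h1, h2⟩ | ⟨h1, h2, h3, h4⟩
  · exact absurd (h2 j h0 hij) hj
  · by_cases hlt : prvL del i < j
    · exact absurd (h4 j hlt hij) hj
    · by_cases hgt : j < prvL del i
      · exact absurd (hb _ hgt h2) h3
      · omega

lemma prvL_eq_neg_one {del : List Int} {i : Int}
    (h : ∀ t, 0 ≤ t → t < i → t ∈ del) : prvL del i = -1 := by
  rcases prvL_spec del i with ⟨h1, _⟩ | ⟨h1, h2, h3, _⟩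
  · exact h1
  · exact absurd (h _ h1 h2) h3

lemma bScanUp_eq (n : Int) (del : PySem.Set Int) :
    ∀ (f : Nat) (j : Int), (n - j).toNat ≤ f →
    bScanUp n del f j = ((PySem.List.pyRange j n 1).filter (fun t => !(del.contains t))).headD (-1) := by
  intro f
  induction f with
  | zero =>
    intro j h
    rw [PySem.List.pyRange_one_eq_nil (by omega : n ≤ j)]
    simp only [bScanUp, List.filter_nil, List.headD_nil]
    rw [if_neg (by omega : ¬ (j < n))]
  | succ f ih =>
    intro j h
    by_cases hjn : j < n
    · rw [PySem.List.pyRange_one_cons hjn]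
      by_cases hmem : del.contains j
      · rw [List.filter_cons_of_neg (by simp_all)]
        simp only [bScanUp, hjn, hmem, decide_true, Bool.and_self, if_true]
        exact ih (j + 1) (by omega)
      · rw [List.filter_cons_of_pos (by simp_all)]
        simp only [bScanUp, hmem, Bool.and_false, Bool.false_eq_true, if_false, List.headD_cons]
        rw [if_pos hjn]
    · rw [PySem.List.pyRange_one_eq_nil (by omega : n ≤ j)]
      simp only [bScanUp, List.filter_nil, List.headD_nil]
      rw [if_neg (by simp [hjn]), if_neg hjn]

lemma bNext_eq (n : Int) (del : PySem.Set Int) (i : Int) : bNext n del i = nxtL n del i :=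
  bScanUp_eq n del _ (i + 1) le_rfl

lemma bScanDown_eq (del : PySem.Set Int) :
    ∀ (f : Nat) (j : Int), (j + 1).toNat ≤ f →
    bScanDown del f j = ((PySem.List.pyRange j (-1) (-1)).filter (fun t => !(del.contains t))).headD (-1) := by
  intro f
  induction f with
  | zero =>
    intro j h
    rw [PySem.List.pyRange_neg_one_eq_nil (by omega : j ≤ -1)]
    simp only [bScanDown, List.filter_nil, List.headD_nil]
    rw [if_neg (by omega : ¬ (0 ≤ j))]
  | succ f ih =>
    intro j h
    by_cases hj0 : 0 ≤ j
    · rw [PySem.List.pyRange_neg_one_cons (by omega : (-1 : Int) < j)]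
      by_cases hmem : del.contains j
      · rw [List.filter_cons_of_neg (by simp_all)]
        simp only [bScanDown, hj0, hmem, decide_true, Bool.and_self, if_true]
        exact ih (j - 1) (by omega)
      · rw [List.filter_cons_of_pos (by simp_all)]
        simp only [bScanDown, hmem, Bool.and_false, Bool.false_eq_true, if_false, List.headD_cons]
        rw [if_pos hj0]
    · rw [PySem.List.pyRange_neg_one_eq_nil (by omega : j ≤ -1)]
      simp only [bScanDown, List.filter_nil, List.headD_nil]
      rw [if_neg (by simp [hj0]), if_neg hj0]

lemma bPrev_eq (del : PySem.Set Int) (i : Int) : bPrev del i = prvL del i :=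
  bScanDown_eq del _ (i - 1) (by omega)

lemma liveAbove_split {n : Int} {del : List Int} {i j : Int} {rest : List Int}
    (h : liveAbove n del i = j :: rest) : liveAbove n del j = rest := by
  have hj : j ∈ liveAbove n del i := h ▸ List.mem_cons_self
  obtain ⟨hij, hjn, hjd⟩ := mem_liveAbove.mp hj
  have hsplit : PySem.List.pyRange (i + 1) n 1 =
      PySem.List.pyRange (i + 1) (j + 1) 1 ++ PySem.List.pyRange (j + 1) n 1 :=
    PySem.List.pyRange_one_append _ _ _ (by omega) (by omega)
  unfold liveAbove at h ⊢
  rw [hsplit, List.filter_append] at h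
  have hpw : ((PySem.List.pyRange (i + 1) (j + 1) 1).filter (fun t => !(del.contains t))).Pairwise (· < ·) :=
    List.Pairwise.filter _ (PySem.List.pairwise_lt_pyRange_one _ _)
  cases hl1 : (PySem.List.pyRange (i + 1) (j + 1) 1).filter (fun t => !(del.contains t)) with
  | nil =>
    rw [hl1, List.nil_append] at h
    have : j ∈ PySem.List.pyRange (j + 1) n 1 :=
      List.mem_of_mem_filter (h ▸ List.mem_cons_self)
    have := PySem.List.mem_pyRange_one.mp this
    omega
  | cons b l1' =>
    rw [hl1] at h
    have hb : b = j := (List.cons.injEq _ _ _ _).mp h |>.1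
    cases l1' with
    | nil => simpa using (List.cons.injEq _ _ _ _).mp h |>.2
    | cons c l1'' =>
      rw [hl1] at hpw
      have hcmem : c ∈ PySem.List.pyRange (i + 1) (j + 1) 1 :=
        List.mem_of_mem_filter (hl1 ▸ (List.mem_cons_of_mem _ List.mem_cons_self))
      have h1 := PySem.List.mem_pyRange_one.mp hcmem
      have h2 : b < c := (List.pairwise_cons.mp hpw).1 c List.mem_cons_self
      omega

lemma liveBelow_alt (del : List Int) (i : Int) :
    liveBelow del i = ((PySem.List.pyRange 0 i 1).filter (fun t => !(del.contains t))).reverse := by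
  unfold liveBelow
  rw [PySem.List.pyRange_neg_one_eq_reverse, List.filter_reverse]
  norm_num

lemma liveBelow_split {del : List Int} {i j : Int} {rest : List Int}
    (h : liveBelow del i = j :: rest) : liveBelow del j = rest := by
  have hj : j ∈ liveBelow del i := h ▸ List.mem_cons_self
  obtain ⟨hj0, hji, hjd⟩ := mem_liveBelow.mp hj
  rw [liveBelow_alt] at h
  have h' : (PySem.List.pyRange 0 i 1).filter (fun t => !(del.contains t)) = rest.reverse ++ [j] :=
    List.reverse_eq_cons_iff.mp h
  have hsplit : PySem.List.pyRange 0 i 1 =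
      PySem.List.pyRange 0 (j + 1) 1 ++ PySem.List.pyRange (j + 1) i 1 :=
    PySem.List.pyRange_one_append _ _ _ (by omega) (by omega)
  rw [hsplit, List.filter_append] at h'
  have h2nil : (PySem.List.pyRange (j + 1) i 1).filter (fun t => !(del.contains t)) = [] := by
    cases hl2 : (PySem.List.pyRange (j + 1) i 1).filter (fun t => !(del.contains t)) with
    | nil => rfl
    | cons c l2' =>
      exfalso
      have hlast : ((PySem.List.pyRange 0 (j + 1) 1).filter (fun t => !(del.contains t)) ++ c :: l2').getLast? = (c :: l2').getLast? :=
        List.getLast?_append_cons _ c _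
      rw [hl2] at h'
      rw [h', List.getLast?_concat] at hlast
      have hlmem : j ∈ c :: l2' := List.mem_of_getLast? hlast.symm
      have : j ∈ PySem.List.pyRange (j + 1) i 1 := List.mem_of_mem_filter (hl2 ▸ hlmem)
      have := PySem.List.mem_pyRange_one.mp this
      omega
  rw [h2nil, List.append_nil] at h'
  have hstep : PySem.List.pyRange 0 (j + 1) 1 = PySem.List.pyRange 0 j 1 ++ [j] :=
    PySem.List.pyRange_one_succ_right (by omega)
  rw [hstep, List.filter_append] at h'
  have hkeep : [j].filter (fun t => !(del.contains t)) = [j] := by simp [hjd]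
  rw [hkeep] at h'
  have hpre : (PySem.List.pyRange 0 j 1).filter (fun t => !(del.contains t)) = rest.reverse :=
    List.append_cancel_right h'
  rw [liveBelow_alt, hpre, List.reverse_reverse]


lemma adj_up_down {n : Int} {del : List Int} {i k : Int} (hk : 0 ≤ k) (hi0 : 0 ≤ i)
    (hidel : i ∉ del) (h : nxtL n del i = k) : prvL del k = i := by
  rcases nxtL_spec n del i with ⟨h1, _⟩ | ⟨h1, h2, h3, h4⟩
  · omega
  · rw [h] at h1 h4
    exact prvL_eq_of hi0 h1 hidel h4

lemma adj_down_up {n : Int} {del : List Int} {i k : Int} (hi : 0 ≤ i) (hkn : k < n)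
    (hkdel : k ∉ del) (h : prvL del k = i) : nxtL n del i = k := by
  rcases prvL_spec del k with ⟨h1, _⟩ | ⟨h1, h2, h3, h4⟩
  · omega
  · rw [h] at h2 h4
    exact nxtL_eq_of h2 hkn hkdel h4

lemma nxtL_toggle {n : Int} {del del2 : List Int} {kx : Int}
    (hmem : ∀ t : Int, t ∈ del2 ↔ t ∈ del ∨ t = kx) (hk0 : 0 ≤ kx) (i : Int) :
    nxtL n del2 i = if nxtL n del i = kx then nxtL n del kx else nxtL n del i := by
  split_ifs with hcase
  · rcases nxtL_spec n del i with ⟨h1, _⟩ | ⟨h1, h2, h3, h4⟩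
    · omega
    · rw [hcase] at h1 h2 h4
      rcases nxtL_spec n del kx with ⟨g1, g2⟩ | ⟨g1, g2, g3, g4⟩
      · rw [g1]
        refine nxtL_eq_neg_one (fun t ht1 ht2 => ?_)
        rcases lt_trichotomy t kx with hlt | heq | hgt
        · exact (hmem t).mpr (Or.inl (h4 t ht1 hlt))
        · exact (hmem t).mpr (Or.inr heq)
        · exact (hmem t).mpr (Or.inl (g2 t hgt ht2))
      · refine nxtL_eq_of (by omega) g2 (fun hc => ?_) (fun t ht1 ht2 => ?_)
        · rcases (hmem _).mp hc with hc' | hc'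
          · exact g3 hc'
          · omega
        · rcases lt_trichotomy t kx with hlt | heq | hgt
          · exact (hmem t).mpr (Or.inl (h4 t ht1 hlt))
          · exact (hmem t).mpr (Or.inr heq)
          · exact (hmem t).mpr (Or.inl (g4 t hgt ht2))
  · rcases nxtL_spec n del i with ⟨h1, h2⟩ | ⟨h1, h2, h3, h4⟩
    · rw [h1]
      exact nxtL_eq_neg_one (fun t ht1 ht2 => (hmem t).mpr (Or.inl (h2 t ht1 ht2)))
    · refine nxtL_eq_of h1 h2 (fun hc => ?_) (fun t ht1 ht2 => (hmem t).mpr (Or.inl (h4 t ht1 ht2)))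
      rcases (hmem _).mp hc with hc' | hc'
      · exact h3 hc'
      · exact hcase hc'

lemma prvL_toggle {del del2 : List Int} {kx : Int}
    (hmem : ∀ t : Int, t ∈ del2 ↔ t ∈ del ∨ t = kx) (hk0 : 0 ≤ kx) (i : Int) :
    prvL del2 i = if prvL del i = kx then prvL del kx else prvL del i := by
  split_ifs with hcase
  · rcases prvL_spec del i with ⟨h1, _⟩ | ⟨h1, h2, h3, h4⟩
    · omega
    · rw [hcase] at h1 h2 h4
      rcases prvL_spec del kx with ⟨g1, g2⟩ | ⟨g1, g2, g3, g4⟩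
      · rw [g1]
        refine prvL_eq_neg_one (fun t ht1 ht2 => ?_)
        rcases lt_trichotomy t kx with hlt | heq | hgt
        · exact (hmem t).mpr (Or.inl (g2 t ht1 hlt))
        · exact (hmem t).mpr (Or.inr heq)
        · exact (hmem t).mpr (Or.inl (h4 t hgt ht2))
      · refine prvL_eq_of g1 (by omega) (fun hc => ?_) (fun t ht1 ht2 => ?_)
        · rcases (hmem _).mp hc with hc' | hc'
          · exact g3 hc'
          · omega
        · rcases lt_trichotomy t kx with hlt | heq | hgt
          · exact (hmem t).mpr (Or.inl (g4 t ht1 hlt))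
          · exact (hmem t).mpr (Or.inr heq)
          · exact (hmem t).mpr (Or.inl (h4 t hgt ht2))
  · rcases prvL_spec del i with ⟨h1, h2⟩ | ⟨h1, h2, h3, h4⟩
    · rw [h1]
      exact prvL_eq_neg_one (fun t ht1 ht2 => (hmem t).mpr (Or.inl (h2 t ht1 ht2)))
    · refine prvL_eq_of h1 h2 (fun hc => ?_) (fun t ht1 ht2 => (hmem t).mpr (Or.inl (h4 t ht1 ht2)))
      rcases (hmem _).mp hc with hc' | hc'
      · exact h3 hc'
      · exact hcase hc'

lemma chainUp (n : Int) (del : List Int) (ll : PySem.Dict Int (Int × Int))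
    (Hll : ∀ i : Int, 0 ≤ i → i < n → i ∉ del → ll.get? i = some (prvL del i, nxtL n del i))
    (c : Int) (hc0 : 0 ≤ c) (hcn : c < n) (hcd : c ∉ del) :
    ∀ m : Nat, m ≤ (liveAbove n del c).length + 1 →
      ((fun q => (ll.getD q (0, 0)).2)^[m] c = (fun q => nxtL n del q)^[m] c) ∧
      ((fun q => nxtL n del q)^[m] c =
        if m = 0 then c
        else if m ≤ (liveAbove n del c).length then (liveAbove n del c).getD (m - 1) (-1) else -1) ∧
      (m ≤ (liveAbove n del c).length →
        (0 ≤ (fun q => nxtL n del q)^[m] c ∧ (fun q => nxtL n del q)^[m] c < n ∧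
          (fun q => nxtL n del q)^[m] c ∉ del ∧
          liveAbove n del ((fun q => nxtL n del q)^[m] c) = (liveAbove n del c).drop m)) := by
  intro m
  induction m with
  | zero => exact fun _ => ⟨rfl, by simp, fun _ => ⟨hc0, hcn, hcd, by simp⟩⟩
  | succ m ih =>
    intro hm
    have hmle : m ≤ (liveAbove n del c).length := by omega
    obtain ⟨e1, _, e3⟩ := ih (by omega)
    obtain ⟨p0, pn, pd, pLA⟩ := e3 hmle
    have hstepB : (fun q => nxtL n del q)^[m+1] c = nxtL n del ((fun q => nxtL n del q)^[m] c) :=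
      Function.iterate_succ_apply' _ _ _
    have hstepA : (fun q => (ll.getD q (0, 0)).2)^[m+1] c =
        (ll.getD ((fun q => (ll.getD q (0, 0)).2)^[m] c) (0, 0)).2 :=
      Function.iterate_succ_apply' _ _ _
    have hgd : ll.getD ((fun q => nxtL n del q)^[m] c) (0, 0) =
        (prvL del ((fun q => nxtL n del q)^[m] c), nxtL n del ((fun q => nxtL n del q)^[m] c)) := by
      simp [PySem.Dict.getD, Hll _ p0 pn pd]
    have he1 : (fun q => (ll.getD q (0, 0)).2)^[m+1] c = (fun q => nxtL n del q)^[m+1] c := by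
      rw [hstepA, e1, hgd, hstepB]
    have hval : nxtL n del ((fun q => nxtL n del q)^[m] c) =
        ((liveAbove n del c).drop m).headD (-1) := by
      rw [nxtL, pLA]
    by_cases hcase : m + 1 ≤ (liveAbove n del c).length
    · have hlt : m < (liveAbove n del c).length := by omega
      have hdrop : (liveAbove n del c).drop m =
          (liveAbove n del c)[m] :: (liveAbove n del c).drop (m + 1) := List.drop_eq_getElem_cons hlt
      have hv : (fun q => nxtL n del q)^[m+1] c = (liveAbove n del c)[m] := by
        rw [hstepB, hval, hdrop, List.headD_cons]
      have hmem := mem_liveAbove.mp (List.getElem_mem hlt)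
      refine ⟨he1, ?_, fun _ => ?_⟩
      · rw [hv, if_neg (by omega), if_pos hcase]
        rw [List.getD_eq_getElem _ _ (by omega : m + 1 - 1 < (liveAbove n del c).length)]
        congr 1
      · refine ⟨by rw [hv]; omega, by rw [hv]; omega, by rw [hv]; exact hmem.2.2, ?_⟩
        rw [hv]
        exact liveAbove_split (by rw [← hdrop, ← pLA])
    · have hm' : m = (liveAbove n del c).length := by omega
      have hv : (fun q => nxtL n del q)^[m+1] c = -1 := by
        rw [hstepB, hval, hm', List.drop_length, List.headD_nil]
      exact ⟨he1, by rw [hv, if_neg (by omega), if_neg hcase], fun hc => absurd hc hcase⟩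

lemma chainDown (n : Int) (del : List Int) (ll : PySem.Dict Int (Int × Int))
    (Hll : ∀ i : Int, 0 ≤ i → i < n → i ∉ del → ll.get? i = some (prvL del i, nxtL n del i))
    (c : Int) (hc0 : 0 ≤ c) (hcn : c < n) (hcd : c ∉ del) :
    ∀ m : Nat, m ≤ (liveBelow del c).length + 1 →
      ((fun q => (ll.getD q (0, 0)).1)^[m] c = (fun q => prvL del q)^[m] c) ∧
      ((fun q => prvL del q)^[m] c =
        if m = 0 then c
        else if m ≤ (liveBelow del c).length then (liveBelow del c).getD (m - 1) (-1) else -1) ∧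
      (m ≤ (liveBelow del c).length →
        (0 ≤ (fun q => prvL del q)^[m] c ∧ (fun q => prvL del q)^[m] c < n ∧
          (fun q => prvL del q)^[m] c ∉ del ∧
          liveBelow del ((fun q => prvL del q)^[m] c) = (liveBelow del c).drop m)) := by
  intro m
  induction m with
  | zero => exact fun _ => ⟨rfl, by simp, fun _ => ⟨hc0, hcn, hcd, by simp⟩⟩
  | succ m ih =>
    intro hm
    have hmle : m ≤ (liveBelow del c).length := by omega
    obtain ⟨e1, _, e3⟩ := ih (by omega)
    obtain ⟨p0, pn, pd, pLB⟩ := e3 hmle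
    have hstepB : (fun q => prvL del q)^[m+1] c = prvL del ((fun q => prvL del q)^[m] c) :=
      Function.iterate_succ_apply' _ _ _
    have hstepA : (fun q => (ll.getD q (0, 0)).1)^[m+1] c =
        (ll.getD ((fun q => (ll.getD q (0, 0)).1)^[m] c) (0, 0)).1 :=
      Function.iterate_succ_apply' _ _ _
    have hgd : ll.getD ((fun q => prvL del q)^[m] c) (0, 0) =
        (prvL del ((fun q => prvL del q)^[m] c), nxtL n del ((fun q => prvL del q)^[m] c)) := by
      simp [PySem.Dict.getD, Hll _ p0 pn pd]
    have he1 : (fun q => (ll.getD q (0, 0)).1)^[m+1] c = (fun q => prvL del q)^[m+1] c := by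
      rw [hstepA, e1, hgd, hstepB]
    have hval : prvL del ((fun q => prvL del q)^[m] c) =
        ((liveBelow del c).drop m).headD (-1) := by
      rw [prvL, pLB]
    by_cases hcase : m + 1 ≤ (liveBelow del c).length
    · have hlt : m < (liveBelow del c).length := by omega
      have hdrop : (liveBelow del c).drop m =
          (liveBelow del c)[m] :: (liveBelow del c).drop (m + 1) := List.drop_eq_getElem_cons hlt
      have hv : (fun q => prvL del q)^[m+1] c = (liveBelow del c)[m] := by
        rw [hstepB, hval, hdrop, List.headD_cons]
      have hmem := mem_liveBelow.mp (List.getElem_mem hlt)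
      refine ⟨he1, ?_, fun _ => ?_⟩
      · rw [hv, if_neg (by omega), if_pos hcase]
        rw [List.getD_eq_getElem _ _ (by omega : m + 1 - 1 < (liveBelow del c).length)]
        congr 1
      · refine ⟨by rw [hv]; omega, by rw [hv]; omega, by rw [hv]; exact hmem.2.2, ?_⟩
        rw [hv]
        exact liveBelow_split (by rw [← hdrop, ← pLB])
    · have hm' : m = (liveBelow del c).length := by omega
      have hv : (fun q => prvL del q)^[m+1] c = -1 := by
        rw [hstepB, hval, hm', List.drop_length, List.headD_nil]
      exact ⟨he1, by rw [hv, if_neg (by omega), if_neg hcase], fun hc => absurd hc hcase⟩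

lemma find?_pyRangeAux (i : Int) :
    ∀ (f : Nat) (a b : Int), (b - a).toNat ≤ f → a ≤ i → i < b →
      (PySem.List.pyRange a b 1).find? (fun j => j == i) = some i := by
  intro f
  induction f with
  | zero => intro a b h h1 h2; omega
  | succ f ih =>
    intro a b h h1 h2
    rw [PySem.List.pyRange_one_cons (by omega : a < b)]
    by_cases hai : a = i
    · rw [List.find?_cons_of_pos (by simp [hai])]
      rw [hai]
    · rw [List.find?_cons_of_neg (by simp [hai])]
      exact ih (a + 1) b (by omega) (by omega) h2

lemma prvL_nil (i : Int) (h : 0 ≤ i) : prvL [] i = i - 1 := by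
  unfold prvL liveBelow
  by_cases h1 : 1 ≤ i
  · rw [PySem.List.pyRange_neg_one_cons (by omega : (-1 : Int) < i - 1)]
    simp
  · have : i = 0 := by omega
    rw [this]
    rw [PySem.List.pyRange_neg_one_eq_nil (by omega : (0 : Int) - 1 ≤ -1)]
    simp

lemma nxtL_nil (n i : Int) : nxtL n [] i = if i + 1 < n then i + 1 else -1 := by
  unfold nxtL liveAbove
  split_ifs with h1
  · rw [PySem.List.pyRange_one_cons (by omega : i + 1 < n)]
    simp
  · rw [PySem.List.pyRange_one_eq_nil (by omega : n ≤ i + 1)]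
    simp

lemma init_get? (n : Int) (i : Int) (h0 : 0 ≤ i) (hin : i < n) :
    (aInitLL n).get? i = some (prvL [] i, nxtL n [] i) := by
  rw [prvL_nil i h0, nxtL_nil]
  unfold aInitLL
  by_cases hlast : i = n - 1
  · rw [← hlast, PySem.Dict.get?_insert_self]
    rw [if_neg (by omega), hlast]
    have : n - 2 = n - 1 - 1 := by omega
    rw [this]
  · rw [PySem.Dict.get?_insert_of_ne _ _ (by omega : i ≠ n - 1)]
    have hnn : i + 1 < n := by omega
    rw [if_pos hnn]
    by_cases h00 : i = 0
    · rw [← h00, PySem.Dict.get?_insert_self, h00]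
      norm_num
    · rw [PySem.Dict.get?_insert_of_ne _ _ h00]
      have hitems := PySem.Dict.items_foldl_insert_fresh (PySem.List.pyRange 0 n 1) id
        (fun j => (j - 1, j + 1)) (PySem.Dict.mk [])
        (by intro a _; simp [PySem.Dict.contains])
        (by simpa using PySem.List.nodup_pyRange_one 0 n)
      show ((PySem.List.pyRange 0 n 1).foldl (fun d j => d.insert j (j - 1, j + 1))
          (PySem.Dict.mk [])).get? i = _
      unfold PySem.Dict.get?
      simp only [id] at hitems
      rw [hitems]
      simp only [List.nil_append]
      rw [List.find?_map]
      have : (PySem.List.pyRange 0 n 1).find? ((fun p => p.1 == i) ∘ (fun j => (j, (j - 1, j + 1)))) =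
          (PySem.List.pyRange 0 n 1).find? (fun j => j == i) := rfl
      rw [this, find?_pyRangeAux i (n - 0).toNat 0 n le_rfl h0 hin]
      rfl

lemma parse_eqA (a : String) : aParse a = chkParse a := by
  unfold aParse chkParse
  cases h : PySem.Str.split₀ a with
  | nil => simp
  | cons x t => cases t <;> simp

lemma parse_eqB (a : String) : bParse a = chkParse a := by
  unfold bParse chkParse
  cases h : PySem.Str.split₀ a with
  | nil => simp
  | cons x t => cases t <;> simp



lemma set_add_eq {del : List Int} {c : Int} (h : c ∉ del) : PySem.Set.add del c = del ++ [c] := by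
  simp [PySem.Set.add, List.contains_eq_mem, h]

lemma mem_set_add {del : List Int} {c t : Int} (h : c ∉ del) :
    t ∈ PySem.Set.add del c ↔ t ∈ del ∨ t = c := by
  rw [set_add_eq h]; simp

lemma mem_discard {del : List Int} {i t : Int} :
    t ∈ PySem.Set.discard del i ↔ t ∈ del ∧ t ≠ i := by
  simp [PySem.Set.discard, List.mem_filter]

lemma discard_add_self {del : List Int} {c : Int} (h : c ∉ del) :
    PySem.Set.discard (PySem.Set.add del c) c = del := by
  rw [set_add_eq h]
  simp only [PySem.Set.discard, List.filter_append]
  have hself : List.filter (fun y => !(y == c)) del = del := by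
    apply List.filter_eq_self.mpr
    intro a ha
    have : a ≠ c := fun he => h (by rwa [he] at ha)
    simp [this]
  rw [hself]
  simp

lemma stepC_inv (n : Int) (sa : AState) (sb : BState) (cur : Int) (del stk : List Int)
    (hans : sa.ans = sb.ans) (hacur : sa.cur = cur) (hbcur : sb.cur = cur) (hbdel : sb.del = del)
    (hbstk : sb.stk = stk) (hdb : ∀ j ∈ del, 0 ≤ j ∧ j < n)
    (Hll : ∀ i : Int, 0 ≤ i → i < n → i ∉ del → sa.ll.get? i = some (prvL del i, nxtL n del i))
    (hSR : StackRel n del sa.stk.reverse sb.stk.reverse)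
    (h0 : 0 ≤ cur) (h1 : cur < n) (h2 : cur ∉ del) (c : String) (ch : Char) (rest : List Char)
    (hact : c.toList = ch :: rest) (hD : ch = 'C') :
    InvAB n (aStep sa c) (bStep n sb c)
      ((if (liveAbove n (PySem.Set.add del cur) cur).headD (-1) ≠ -1
          then (liveAbove n (PySem.Set.add del cur) cur).headD (-1)
          else (liveBelow (PySem.Set.add del cur) cur).headD (-1)),
        PySem.Set.add del cur, stk ++ [cur]) := by
  subst hD
  have hmem : ∀ t : Int, t ∈ PySem.Set.add del cur ↔ t ∈ del ∨ t = cur := fun t => mem_set_add h2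
  have hpn : sa.ll.getD sa.cur (0, 0) = (prvL del cur, nxtL n del cur) := by
    rw [hacur]; simp [PySem.Dict.getD, Hll cur h0 h1 h2]
  have hps := prvL_spec del cur
  have hns := nxtL_spec n del cur
  have hnx2 : nxtL n (PySem.Set.add del cur) cur = nxtL n del cur := by
    rw [nxtL_toggle hmem h0 cur, if_neg (by rcases hns with ⟨e, _⟩ | ⟨e, _⟩ <;> omega)]
  have hp2 : prvL (PySem.Set.add del cur) cur = prvL del cur := by
    rw [prvL_toggle hmem h0 cur, if_neg (by rcases hps with ⟨e, _⟩ | ⟨e, _⟩ <;> omega)]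
  have haEq : aStep sa c =
      { ans := PySem.List.pySetD sa.ans sa.cur "X",
        cur := if nxtL n del cur ≠ -1 then nxtL n del cur else prvL del cur,
        ll := (if nxtL n del cur ≠ -1 then
                 (if prvL del cur ≠ -1 then
                    sa.ll.modify (prvL del cur) (0, 0) (fun pr => (pr.1, nxtL n del cur))
                  else sa.ll).modify (nxtL n del cur) (0, 0) (fun pr => (prvL del cur, pr.2))
               else (if prvL del cur ≠ -1 then
                    sa.ll.modify (prvL del cur) (0, 0) (fun pr => (pr.1, nxtL n del cur))
                  else sa.ll)),
        stk := sa.stk ++ [(sa.cur, prvL del cur, nxtL n del cur)] } := by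
    unfold aStep
    rw [hact]
    simp only [show ¬(('C' : Char) = 'D') by decide, if_false, show ¬(('C' : Char) = 'U') by decide,
      if_true, hpn]
  have hbEq : bStep n sb c =
      { ans := PySem.List.pySetD sb.ans sb.cur "X",
        cur := if bNext n (PySem.Set.add del cur) cur ≠ -1 then bNext n (PySem.Set.add del cur) cur
               else bPrev (PySem.Set.add del cur) cur,
        del := PySem.Set.add del cur,
        stk := sb.stk ++ [sb.cur] } := by
    unfold bStep
    rw [hact]
    simp only [show ¬(('C' : Char) = 'D') by decide, if_false, show ¬(('C' : Char) = 'U') by decide,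
      if_true, hbdel, hbcur]
  rw [haEq, hbEq]
  refine ⟨?_, ?_, ?_, rfl, ?_, ?_, ?_, ?_, ?_⟩
  · show PySem.List.pySetD sa.ans sa.cur "X" = PySem.List.pySetD sb.ans sb.cur "X"
    rw [hans, hacur, hbcur]
  · show (if nxtL n del cur ≠ -1 then nxtL n del cur else prvL del cur) = _
    show _ = (if nxtL n (PySem.Set.add del cur) cur ≠ -1 then nxtL n (PySem.Set.add del cur) cur
              else prvL (PySem.Set.add del cur) cur)
    rw [hnx2, hp2]
  · show (if bNext n (PySem.Set.add del cur) cur ≠ -1 then bNext n (PySem.Set.add del cur) cur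
          else bPrev (PySem.Set.add del cur) cur) = _
    rw [bNext_eq, bPrev_eq, hnx2, hp2]
    show _ = (if nxtL n (PySem.Set.add del cur) cur ≠ -1 then nxtL n (PySem.Set.add del cur) cur
              else prvL (PySem.Set.add del cur) cur)
    rw [hnx2, hp2]
  · show sb.stk ++ [sb.cur] = stk ++ [cur]
    rw [hbstk, hbcur]
  · intro j hj
    rcases (hmem j).mp hj with h | h
    · exact hdb j h
    · omega
  · show (if (liveAbove n (PySem.Set.add del cur) cur).headD (-1) ≠ -1 then _ else _) = -1 ∨ _
    by_cases hnxe : nxtL n del cur ≠ -1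
    · right
      rw [if_pos (by rw [show (liveAbove n (PySem.Set.add del cur) cur).headD (-1) =
            nxtL n (PySem.Set.add del cur) cur from rfl, hnx2]; exact hnxe)]
      rw [show (liveAbove n (PySem.Set.add del cur) cur).headD (-1) =
            nxtL n (PySem.Set.add del cur) cur from rfl, hnx2]
      rcases hns with ⟨e, _⟩ | ⟨e1, e2, e3, _⟩
      · omega
      · refine ⟨by omega, e2, fun hc => ?_⟩
        rcases (hmem _).mp hc with h | h
        · exact e3 h
        · omega
    · rw [if_neg (by rw [show (liveAbove n (PySem.Set.add del cur) cur).headD (-1) =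
            nxtL n (PySem.Set.add del cur) cur from rfl, hnx2]; exact hnxe)]
      rw [show (liveBelow (PySem.Set.add del cur) cur).headD (-1) =
            prvL (PySem.Set.add del cur) cur from rfl, hp2]
      rcases hps with ⟨e, _⟩ | ⟨e1, e2, e3, _⟩
      · left; exact e
      · right
        refine ⟨e1, by omega, fun hc => ?_⟩
        rcases (hmem _).mp hc with h | h
        · exact e3 h
        · omega
  · -- dictionary invariant after the patches
    intro j hj0 hjn hjd2
    have hjc : j ≠ cur := fun he => hjd2 ((hmem j).mpr (Or.inr he))
    have hjd : j ∉ del := fun he => hjd2 ((hmem j).mpr (Or.inl he))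
    have tN := nxtL_toggle (n := n) hmem h0 j
    have tP := prvL_toggle hmem h0 j
    show (if nxtL n del cur ≠ -1 then
            (if prvL del cur ≠ -1 then
               sa.ll.modify (prvL del cur) (0, 0) (fun pr => (pr.1, nxtL n del cur))
             else sa.ll).modify (nxtL n del cur) (0, 0) (fun pr => (prvL del cur, pr.2))
          else (if prvL del cur ≠ -1 then
               sa.ll.modify (prvL del cur) (0, 0) (fun pr => (pr.1, nxtL n del cur))
             else sa.ll)).get? j =
      some (prvL (PySem.Set.add del cur) j, nxtL n (PySem.Set.add del cur) j)
    by_cases hjp : j = prvL del cur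
    · -- j is the live predecessor of cur
      have hpadj : nxtL n del (prvL del cur) = cur := adj_down_up (hjp ▸ hj0) h1 h2 rfl
      have hpne : prvL del cur ≠ cur := by omega
      have hgdP : sa.ll.getD (prvL del cur) (0, 0) = (prvL del (prvL del cur), nxtL n del (prvL del cur)) := by
        simp [PySem.Dict.getD, Hll (prvL del cur) (hjp ▸ hj0) (hjp ▸ hjn) (hjp ▸ hjd)]
      have hinner : ((if prvL del cur ≠ -1 then
            sa.ll.modify (prvL del cur) (0, 0) (fun pr => (pr.1, nxtL n del cur))
          else sa.ll)).get? j = some ((prvL del (prvL del cur), cur).1, nxtL n del cur) := by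
        rw [if_pos (by omega : prvL del cur ≠ -1)]
        simp only [PySem.Dict.modify]
        rw [hjp, PySem.Dict.get?_insert_self, hgdP, hpadj]
      have hres : (if nxtL n del cur ≠ -1 then
            (if prvL del cur ≠ -1 then
               sa.ll.modify (prvL del cur) (0, 0) (fun pr => (pr.1, nxtL n del cur))
             else sa.ll).modify (nxtL n del cur) (0, 0) (fun pr => (prvL del cur, pr.2))
          else (if prvL del cur ≠ -1 then
               sa.ll.modify (prvL del cur) (0, 0) (fun pr => (pr.1, nxtL n del cur))
             else sa.ll)).get? j = some (prvL del (prvL del cur), nxtL n del cur) := by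
        by_cases hNXe : nxtL n del cur ≠ -1
        · have hcurNX : cur < nxtL n del cur := by
            rcases hns with ⟨e, _⟩ | ⟨e, _⟩ <;> omega
          rw [if_pos hNXe]
          simp only [PySem.Dict.modify] at hinner ⊢
          rw [PySem.Dict.get?_insert_of_ne _ _ (by omega : j ≠ nxtL n del cur), hinner]
        · rw [if_neg hNXe, hinner]
      rw [hres]
      have hjlt : j < cur := by rcases hps with ⟨e, _⟩ | ⟨e, f, _⟩ <;> omega
      have e1 : prvL (PySem.Set.add del cur) j = prvL del (prvL del cur) := by
        rw [tP, if_neg (by rcases prvL_spec del j with ⟨e, _⟩ | ⟨e, f, _⟩ <;> omega), ← hjp]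
      have e2 : nxtL n (PySem.Set.add del cur) j = nxtL n del cur := by
        rw [tN, if_pos (by rw [hjp]; exact hpadj)]
      rw [e1, e2]
    · by_cases hjn2 : j = nxtL n del cur
      · -- j is the live successor of cur
        have hnadj : prvL del (nxtL n del cur) = cur := adj_up_down (hjn2 ▸ hj0) h0 h2 rfl
        have hcurNX : cur < nxtL n del cur := by
          rcases hns with ⟨e, _⟩ | ⟨e, _⟩ <;> omega
        have hgdN : sa.ll.getD (nxtL n del cur) (0, 0) =
            (prvL del (nxtL n del cur), nxtL n del (nxtL n del cur)) := by
          simp [PySem.Dict.getD, Hll (nxtL n del cur) (hjn2 ▸ hj0) (hjn2 ▸ hjn) (hjn2 ▸ hjd)]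
        have hinner : (if prvL del cur ≠ -1 then
              sa.ll.modify (prvL del cur) (0, 0) (fun pr => (pr.1, nxtL n del cur))
            else sa.ll).getD (nxtL n del cur) (0, 0) =
            (prvL del (nxtL n del cur), nxtL n del (nxtL n del cur)) := by
          by_cases hPe : prvL del cur ≠ -1
          · have hPlt : prvL del cur < cur := by
              rcases hps with ⟨e, _⟩ | ⟨e, f, _⟩ <;> omega
            rw [if_pos hPe]
            simp only [PySem.Dict.modify, PySem.Dict.getD]
            rw [PySem.Dict.get?_insert_of_ne _ _ (by omega : nxtL n del cur ≠ prvL del cur)]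
            have := Hll (nxtL n del cur) (hjn2 ▸ hj0) (hjn2 ▸ hjn) (hjn2 ▸ hjd)
            rw [this]
            rfl
          · rw [if_neg hPe]
            exact hgdN
        rw [if_pos (by omega : nxtL n del cur ≠ -1)]
        simp only [PySem.Dict.modify] at hinner ⊢
        rw [hjn2, PySem.Dict.get?_insert_self, hinner]
        have e1 : prvL (PySem.Set.add del cur) (nxtL n del cur) = prvL del cur := by
          rw [prvL_toggle hmem h0 (nxtL n del cur), if_pos hnadj]
        have e2 : nxtL n (PySem.Set.add del cur) (nxtL n del cur) = nxtL n del (nxtL n del cur) := by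
          rw [nxtL_toggle hmem h0 (nxtL n del cur), if_neg (by
            rcases nxtL_spec n del (nxtL n del cur) with ⟨e, _⟩ | ⟨e, f, _⟩ <;> omega)]
        rw [e1, e2]
      · -- j is untouched
        have hval : (if nxtL n del cur ≠ -1 then
              (if prvL del cur ≠ -1 then
                 sa.ll.modify (prvL del cur) (0, 0) (fun pr => (pr.1, nxtL n del cur))
               else sa.ll).modify (nxtL n del cur) (0, 0) (fun pr => (prvL del cur, pr.2))
            else (if prvL del cur ≠ -1 then
                 sa.ll.modify (prvL del cur) (0, 0) (fun pr => (pr.1, nxtL n del cur))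
               else sa.ll)).get? j = sa.ll.get? j := by
          have hinner : (if prvL del cur ≠ -1 then
                sa.ll.modify (prvL del cur) (0, 0) (fun pr => (pr.1, nxtL n del cur))
              else sa.ll).get? j = sa.ll.get? j := by
            by_cases hPe : prvL del cur ≠ -1
            · rw [if_pos hPe]
              simp only [PySem.Dict.modify]
              rw [PySem.Dict.get?_insert_of_ne _ _ hjp]
            · rw [if_neg hPe]
          by_cases hNXe : nxtL n del cur ≠ -1
          · rw [if_pos hNXe]
            simp only [PySem.Dict.modify] at hinner ⊢
            rw [PySem.Dict.get?_insert_of_ne _ _ hjn2, hinner]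
          · rw [if_neg hNXe, hinner]
        rw [hval, Hll j hj0 hjn hjd]
        have e1 : prvL (PySem.Set.add del cur) j = prvL del j := by
          rw [tP, if_neg (fun hc => hjn2 ((adj_down_up h0 hjn hjd hc).symm ▸ rfl))]
        have e2 : nxtL n (PySem.Set.add del cur) j = nxtL n del j := by
          rw [tN, if_neg (fun hc => hjp ((adj_up_down h0 hj0 hjd hc).symm ▸ rfl))]
        rw [e1, e2]
  · -- stack relation
    show StackRel n (PySem.Set.add del cur) (sa.stk ++ [(sa.cur, prvL del cur, nxtL n del cur)]).reverse
        (sb.stk ++ [sb.cur]).reverse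
    rw [List.reverse_append, List.reverse_append]
    simp only [List.reverse_cons, List.reverse_nil, List.nil_append, List.singleton_append]
    show (sa.cur, prvL del cur, nxtL n del cur) =
        (sb.cur, prvL (PySem.Set.discard (PySem.Set.add del cur) sb.cur) sb.cur,
          nxtL n (PySem.Set.discard (PySem.Set.add del cur) sb.cur) sb.cur) ∧
      sb.cur ∈ PySem.Set.add del cur ∧
      StackRel n (PySem.Set.discard (PySem.Set.add del cur) sb.cur) sa.stk.reverse sb.stk.reverse
    rw [hacur, hbcur, discard_add_self h2]
    exact ⟨rfl, (hmem cur).mpr (Or.inr rfl), hSR⟩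

lemma pop_neg_one_eq {α : Type} {xs r : List α} {v : α}
    (h : PySem.List.pop? xs (-1) = some (v, r)) : xs = r ++ [v] := by
  induction xs using List.reverseRecOn with
  | nil => simp [PySem.List.pop?] at h
  | append_singleton ys y _ =>
    rw [PySem.List.pop?_last] at h
    obtain ⟨h1, h2⟩ := Prod.mk.injEq .. ▸ Option.some_inj.mp h
    rw [← h1, ← h2]

lemma stepZ_inv (n : Int) (sa : AState) (sb : BState) (cur : Int) (del stk : List Int)
    (hans : sa.ans = sb.ans) (hacur : sa.cur = cur) (hbcur : sb.cur = cur) (hbdel : sb.del = del)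
    (hbstk : sb.stk = stk) (hdb : ∀ j ∈ del, 0 ≤ j ∧ j < n)
    (hcc : cur = -1 ∨ (0 ≤ cur ∧ cur < n ∧ cur ∉ del))
    (Hll : ∀ i : Int, 0 ≤ i → i < n → i ∉ del → sa.ll.get? i = some (prvL del i, nxtL n del i))
    (hSR : StackRel n del sa.stk.reverse sb.stk.reverse)
    (idx : Int) (rest' : List Int) (hpop : PySem.List.pop? stk (-1) = some (idx, rest'))
    (c : String) (ch : Char) (rest : List Char)
    (hact : c.toList = ch :: rest) (hD : ch = 'Z') :
    InvAB n (aStep sa c) (bStep n sb c) (cur, PySem.Set.discard del idx, rest') := by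
  subst hD
  have hstk : stk = rest' ++ [idx] := pop_neg_one_eq hpop
  have hbrev : sb.stk.reverse = idx :: rest'.reverse := by
    rw [hbstk, hstk]; simp
  cases hsarev : sa.stk.reverse with
  | nil => rw [hsarev, hbrev] at hSR; exact hSR.elim
  | cons t ta =>
    rw [hsarev, hbrev] at hSR
    obtain ⟨ht, hidxdel, hSRtail⟩ := hSR
    obtain ⟨hidx0, hidxn⟩ := hdb idx hidxdel
    have hsastk : sa.stk = ta.reverse ++ [t] := by
      rw [← List.reverse_reverse sa.stk, hsarev]; simp
    have hpopA : PySem.List.pop? sa.stk (-1) = some (t, ta.reverse) := by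
      rw [hsastk, PySem.List.pop?_last]
    have hidxD2 : idx ∉ PySem.Set.discard del idx := fun hc => (mem_discard.mp hc).2 rfl
    have hmem2 : ∀ tt : Int, tt ∈ del ↔ tt ∈ PySem.Set.discard del idx ∨ tt = idx := by
      intro tt
      constructor
      · intro h
        by_cases he : tt = idx
        · exact Or.inr he
        · exact Or.inl (mem_discard.mpr ⟨h, he⟩)
      · rintro (h | h)
        · exact (mem_discard.mp h).1
        · exact h ▸ hidxdel
    have hps := prvL_spec (PySem.Set.discard del idx) idx
    have hns := nxtL_spec n (PySem.Set.discard del idx) idx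
    have haEq : aStep sa c =
        { ans := PySem.List.pySetD sa.ans idx "O",
          cur := sa.cur,
          ll := (if nxtL n (PySem.Set.discard del idx) idx ≠ -1 then
                   (if prvL (PySem.Set.discard del idx) idx ≠ -1 then
                      sa.ll.modify (prvL (PySem.Set.discard del idx) idx) (0, 0) (fun pr => (pr.1, idx))
                    else sa.ll).modify (nxtL n (PySem.Set.discard del idx) idx) (0, 0) (fun pr => (idx, pr.2))
                 else (if prvL (PySem.Set.discard del idx) idx ≠ -1 then
                      sa.ll.modify (prvL (PySem.Set.discard del idx) idx) (0, 0) (fun pr => (pr.1, idx))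
                    else sa.ll)).insert idx
                   (prvL (PySem.Set.discard del idx) idx, nxtL n (PySem.Set.discard del idx) idx),
          stk := ta.reverse } := by
      unfold aStep
      rw [hact]
      simp only [show ¬(('Z' : Char) = 'D') by decide, if_false, show ¬(('Z' : Char) = 'U') by decide,
        show ¬(('Z' : Char) = 'C') by decide, if_true,
        hpopA, ht]
    have hbEq : bStep n sb c =
        { ans := PySem.List.pySetD sb.ans idx "O",
          cur := sb.cur,
          del := PySem.Set.discard del idx,
          stk := rest' } := by
      unfold bStep
      rw [hact]
      have hpopB : PySem.List.pop? sb.stk (-1) = some (idx, rest') := by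
        rw [hbstk, hstk, PySem.List.pop?_last]
      simp only [show ¬(('Z' : Char) = 'D') by decide, if_false, show ¬(('Z' : Char) = 'U') by decide,
        show ¬(('Z' : Char) = 'C') by decide, if_true,
        hpopB, hbdel]
    rw [haEq, hbEq]
    refine ⟨by rw [hans], hacur, hbcur, rfl, rfl, ?_, ?_, ?_, ?_⟩
    · intro j hj
      exact hdb j (mem_discard.mp hj).1
    · rcases hcc with h | h
      · exact Or.inl h
      · exact Or.inr ⟨h.1, h.2.1, fun hc => h.2.2 (mem_discard.mp hc).1⟩
    · -- dictionary invariant after the restore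
      intro j hj0 hjn hjd2
      have hjdel : j ∉ del ∨ j = idx := by
        by_cases he : j = idx
        · exact Or.inr he
        · exact Or.inl (fun hc => hjd2 (mem_discard.mpr ⟨hc, he⟩))
      by_cases hji : j = idx
      · subst hji
        rw [PySem.Dict.get?_insert_self]
      · have hjdel' : j ∉ del := hjdel.resolve_right hji
        rw [PySem.Dict.get?_insert_of_ne _ _ hji]
        have tN := nxtL_toggle (n := n) hmem2 hidx0 j
        have tP := prvL_toggle hmem2 hidx0 j
        by_cases hjp : j = prvL (PySem.Set.discard del idx) idx
        · -- j is the restored element's predecessor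
          have hjlt : j < idx := by rcases hps with ⟨e, _⟩ | ⟨e, f, _⟩ <;> omega
          have hadj : nxtL n (PySem.Set.discard del idx) j = idx := by
            rw [hjp]
            exact adj_down_up (hjp ▸ hj0) hidxn hidxD2 rfl
          have hgdP : sa.ll.getD j (0, 0) = (prvL del j, nxtL n del j) := by
            simp [PySem.Dict.getD, Hll j hj0 hjn hjdel']
          have hval : (if nxtL n (PySem.Set.discard del idx) idx ≠ -1 then
                   (if prvL (PySem.Set.discard del idx) idx ≠ -1 then
                      sa.ll.modify (prvL (PySem.Set.discard del idx) idx) (0, 0) (fun pr => (pr.1, idx))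
                    else sa.ll).modify (nxtL n (PySem.Set.discard del idx) idx) (0, 0) (fun pr => (idx, pr.2))
                 else (if prvL (PySem.Set.discard del idx) idx ≠ -1 then
                      sa.ll.modify (prvL (PySem.Set.discard del idx) idx) (0, 0) (fun pr => (pr.1, idx))
                    else sa.ll)).get? j = some ((prvL del j, nxtL n del j).1, idx) := by
            have hinner : (if prvL (PySem.Set.discard del idx) idx ≠ -1 then
                  sa.ll.modify (prvL (PySem.Set.discard del idx) idx) (0, 0) (fun pr => (pr.1, idx))
                else sa.ll).get? j = some ((prvL del j, nxtL n del j).1, idx) := by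
              rw [if_pos (by omega : prvL (PySem.Set.discard del idx) idx ≠ -1)]
              simp only [PySem.Dict.modify]
              rw [← hjp, PySem.Dict.get?_insert_self, hgdP]
            by_cases hNXe : nxtL n (PySem.Set.discard del idx) idx ≠ -1
            · have hgt : idx < nxtL n (PySem.Set.discard del idx) idx := by
                rcases hns with ⟨e, _⟩ | ⟨e, f, _⟩ <;> omega
              rw [if_pos hNXe]
              simp only [PySem.Dict.modify] at hinner ⊢
              rw [PySem.Dict.get?_insert_of_ne _ _ (by omega : j ≠ nxtL n (PySem.Set.discard del idx) idx), hinner]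
            · rw [if_neg hNXe, hinner]
          rw [hval]
          have e1 : prvL (PySem.Set.discard del idx) j = prvL del j := by
            have : prvL del j = if prvL (PySem.Set.discard del idx) j = idx then
                prvL (PySem.Set.discard del idx) idx else prvL (PySem.Set.discard del idx) j := tP
            rw [this, if_neg (by
              rcases prvL_spec (PySem.Set.discard del idx) j with ⟨e, _⟩ | ⟨e, f, _⟩ <;> omega)]
          have e2 : nxtL n (PySem.Set.discard del idx) j = idx := hadj
          rw [← e1, e2]
        · by_cases hjn2 : j = nxtL n (PySem.Set.discard del idx) idx
          · -- j is the restored element's successor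
            have hjgt : idx < j := by rcases hns with ⟨e, _⟩ | ⟨e, f, _⟩ <;> omega
            have hadj : prvL (PySem.Set.discard del idx) j = idx := by
              rw [hjn2]
              exact adj_up_down (hjn2 ▸ hj0) hidx0 hidxD2 rfl
            have hgdN : sa.ll.getD j (0, 0) = (prvL del j, nxtL n del j) := by
              simp [PySem.Dict.getD, Hll j hj0 hjn hjdel']
            have hinner : (if prvL (PySem.Set.discard del idx) idx ≠ -1 then
                  sa.ll.modify (prvL (PySem.Set.discard del idx) idx) (0, 0) (fun pr => (pr.1, idx))
                else sa.ll).getD j (0, 0) = (prvL del j, nxtL n del j) := by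
              by_cases hPe : prvL (PySem.Set.discard del idx) idx ≠ -1
              · have hPlt : prvL (PySem.Set.discard del idx) idx < idx := by
                  rcases hps with ⟨e, _⟩ | ⟨e, f, _⟩ <;> omega
                rw [if_pos hPe]
                simp only [PySem.Dict.modify, PySem.Dict.getD]
                rw [PySem.Dict.get?_insert_of_ne _ _ (by omega : j ≠ prvL (PySem.Set.discard del idx) idx)]
                rw [Hll j hj0 hjn hjdel']
                rfl
              · rw [if_neg hPe]
                exact hgdN
            rw [if_pos (by omega : nxtL n (PySem.Set.discard del idx) idx ≠ -1)]
            simp only [PySem.Dict.modify] at hinner ⊢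
            rw [← hjn2, PySem.Dict.get?_insert_self, hinner]
            have e1 : prvL (PySem.Set.discard del idx) j = idx := hadj
            have e2 : nxtL n (PySem.Set.discard del idx) j = nxtL n del j := by
              have : nxtL n del j = if nxtL n (PySem.Set.discard del idx) j = idx then
                  nxtL n (PySem.Set.discard del idx) idx else nxtL n (PySem.Set.discard del idx) j := tN
              rw [this, if_neg (by
                rcases nxtL_spec n (PySem.Set.discard del idx) j with ⟨e, _⟩ | ⟨e, f, _⟩ <;> omega)]
            rw [e1, ← e2]
          · -- j is untouched
            have hval : (if nxtL n (PySem.Set.discard del idx) idx ≠ -1 then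
                   (if prvL (PySem.Set.discard del idx) idx ≠ -1 then
                      sa.ll.modify (prvL (PySem.Set.discard del idx) idx) (0, 0) (fun pr => (pr.1, idx))
                    else sa.ll).modify (nxtL n (PySem.Set.discard del idx) idx) (0, 0) (fun pr => (idx, pr.2))
                 else (if prvL (PySem.Set.discard del idx) idx ≠ -1 then
                      sa.ll.modify (prvL (PySem.Set.discard del idx) idx) (0, 0) (fun pr => (pr.1, idx))
                    else sa.ll)).get? j = sa.ll.get? j := by
              have hinner : (if prvL (PySem.Set.discard del idx) idx ≠ -1 then
                    sa.ll.modify (prvL (PySem.Set.discard del idx) idx) (0, 0) (fun pr => (pr.1, idx))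
                  else sa.ll).get? j = sa.ll.get? j := by
                by_cases hPe : prvL (PySem.Set.discard del idx) idx ≠ -1
                · rw [if_pos hPe]
                  simp only [PySem.Dict.modify]
                  rw [PySem.Dict.get?_insert_of_ne _ _ hjp]
                · rw [if_neg hPe]
              by_cases hNXe : nxtL n (PySem.Set.discard del idx) idx ≠ -1
              · rw [if_pos hNXe]
                simp only [PySem.Dict.modify] at hinner ⊢
                rw [PySem.Dict.get?_insert_of_ne _ _ hjn2, hinner]
              · rw [if_neg hNXe, hinner]
            rw [hval, Hll j hj0 hjn hjdel']
            have e1 : prvL (PySem.Set.discard del idx) j = prvL del j := by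
              have := tP
              rw [this, if_neg (fun hc => hjn2 ((adj_down_up hidx0 hjn hjd2 hc).symm ▸ rfl))]
            have e2 : nxtL n (PySem.Set.discard del idx) j = nxtL n del j := by
              have := tN
              rw [this, if_neg (fun hc => hjp ((adj_up_down hidx0 hj0 hjd2 hc).symm ▸ rfl))]
            rw [← e1, ← e2]
    · -- stack relation
      show StackRel n (PySem.Set.discard del idx) ta.reverse.reverse rest'.reverse
      rw [List.reverse_reverse]
      exact hSRtail

lemma step_inv (n : Int) (sa : AState) (sb : BState) (st st' : Int × List Int × List Int)
    (hInv : InvAB n sa sb st) (c : String) (hchk : chkStep n st c = some st') :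
    InvAB n (aStep sa c) (bStep n sb c) st' := by
  obtain ⟨cur, del, stk⟩ := st
  obtain ⟨hans, hacur, hbcur, hbdel, hbstk, hdb, hcc, Hll, hSR⟩ := hInv
  simp only at hans hacur hbcur hbdel hbstk hdb hcc Hll hSR
  cases hact : c.toList with
  | nil => simp [chkStep, hact] at hchk
  | cons ch rest =>
    by_cases hD : ch = 'D'
    · -- command D x
      simp only [chkStep, hact, hD, if_pos] at hchk
      cases hpar : chkParse c with
      | none => rw [hpar] at hchk; simp at hchk
      | some x =>
        rw [hpar] at hchk
        simp only [] at hchk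
        have haEq : aStep sa c = { sa with
            cur := (PySem.List.pyRange 0 x 1).foldl (fun kk _ => (sa.ll.getD kk (0, 0)).2) sa.cur } := by
          unfold aStep
          rw [hact]
          simp [hD, parse_eqA, hpar]
        have hbEq : bStep n sb c = { sb with
            cur := (PySem.List.pyRange 0 x 1).foldl (fun kk _ => bNext n sb.del kk) sb.cur } := by
          unfold bStep
          rw [hact]
          simp [hD, parse_eqB, hpar]
        have hfoldA : (PySem.List.pyRange 0 x 1).foldl (fun kk _ => (sa.ll.getD kk (0, 0)).2) sa.cur =
            (fun q => (sa.ll.getD q (0, 0)).2)^[x.toNat] cur := by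
          rw [foldl_const_iterate, PySem.List.length_pyRange_one, hacur]
          norm_num
        have hfoldB : (PySem.List.pyRange 0 x 1).foldl (fun kk _ => bNext n sb.del kk) sb.cur =
            (fun q => nxtL n del q)^[x.toNat] cur := by
          have : (fun (kk : Int) (_ : Int) => bNext n sb.del kk) = (fun (kk : Int) (_ : Int) => nxtL n del kk) := by
            funext kk _
            rw [bNext_eq, hbdel]
          rw [this, foldl_const_iterate, PySem.List.length_pyRange_one, hbcur]
          norm_num
        by_cases hx0 : x ≤ 0
        · rw [if_pos hx0] at hchk
          obtain rfl := Option.some_inj.mp hchk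
          rw [PySem.List.pyRange_one_eq_nil (by omega : x ≤ 0)] at haEq hbEq
          simp only [List.foldl_nil] at haEq hbEq
          rw [haEq, hbEq]
          exact ⟨hans, hacur, hbcur, hbdel, hbstk, hdb, hcc, Hll, hSR⟩
        · rw [if_neg hx0] at hchk
          by_cases hcur : 0 ≤ cur ∧ cur < n
          · rw [if_pos hcur] at hchk
            have hlive : cur ∉ del := by
              rcases hcc with h | h
              · omega
              · exact h.2.2
            have hch := chainUp n del sa.ll Hll cur hcur.1 hcur.2 hlive x.toNat
            by_cases hle : x ≤ (liveAbove n del cur).length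
            · rw [if_pos hle] at hchk
              obtain rfl := Option.some_inj.mp hchk
              have hmle : x.toNat ≤ (liveAbove n del cur).length := by omega
              obtain ⟨e1, e2, e3⟩ := hch (by omega)
              obtain ⟨q0, qn, qd, _⟩ := e3 hmle
              rw [haEq, hbEq]
              refine ⟨hans, ?_, ?_, hbdel, hbstk, hdb, ?_, Hll, hSR⟩
              · show (PySem.List.pyRange 0 x 1).foldl _ sa.cur = _
                rw [hfoldA, e1, e2, if_neg (by omega), if_pos hmle]
                congr 1
                omega
              · show (PySem.List.pyRange 0 x 1).foldl _ sb.cur = _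
                rw [hfoldB, e2, if_neg (by omega), if_pos hmle]
                congr 1
                omega
              · right
                have hval : (liveAbove n del cur).getD ((x - 1).toNat) (-1) = (fun q => nxtL n del q)^[x.toNat] cur := by
                  rw [e2, if_neg (by omega), if_pos hmle]
                  congr 1
                  omega
                simp only [hval]
                exact ⟨q0, qn, qd⟩
            · rw [if_neg hle] at hchk
              by_cases heq : x = (liveAbove n del cur).length + 1
              · rw [if_pos heq] at hchk
                obtain rfl := Option.some_inj.mp hchk
                obtain ⟨e1, e2, _⟩ := hch (by omega)
                rw [haEq, hbEq]
                refine ⟨hans, ?_, ?_, hbdel, hbstk, hdb, Or.inl rfl, Hll, hSR⟩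
                · show (PySem.List.pyRange 0 x 1).foldl _ sa.cur = _
                  rw [hfoldA, e1, e2, if_neg (by omega), if_neg (by omega)]
                · show (PySem.List.pyRange 0 x 1).foldl _ sb.cur = _
                  rw [hfoldB, e2, if_neg (by omega), if_neg (by omega)]
              · rw [if_neg heq] at hchk
                simp at hchk
          · rw [if_neg hcur] at hchk
            simp at hchk
    · by_cases hU : ch = 'U'
      · -- command U x
        subst hU
        simp only [chkStep, hact] at hchk
        rw [if_neg (show ¬(('U' : Char) = 'D') by decide)] at hchk
        cases hpar : chkParse c with
        | none => rw [hpar] at hchk; simp at hchk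
        | some x =>
          rw [hpar] at hchk
          simp only [] at hchk
          have haEq : aStep sa c = { sa with
              cur := (PySem.List.pyRange 0 x 1).foldl (fun kk _ => (sa.ll.getD kk (0, 0)).1) sa.cur } := by
            unfold aStep
            rw [hact]
            simp [hD, parse_eqA, hpar]
          have hbEq : bStep n sb c = { sb with
              cur := (PySem.List.pyRange 0 x 1).foldl (fun kk _ => bPrev sb.del kk) sb.cur } := by
            unfold bStep
            rw [hact]
            simp [hD, parse_eqB, hpar]
          have hfoldA : (PySem.List.pyRange 0 x 1).foldl (fun kk _ => (sa.ll.getD kk (0, 0)).1) sa.cur =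
              (fun q => (sa.ll.getD q (0, 0)).1)^[x.toNat] cur := by
            rw [foldl_const_iterate, PySem.List.length_pyRange_one, hacur]
            norm_num
          have hfoldB : (PySem.List.pyRange 0 x 1).foldl (fun kk _ => bPrev sb.del kk) sb.cur =
              (fun q => prvL del q)^[x.toNat] cur := by
            have : (fun (kk : Int) (_ : Int) => bPrev sb.del kk) = (fun (kk : Int) (_ : Int) => prvL del kk) := by
              funext kk _
              rw [bPrev_eq, hbdel]
            rw [this, foldl_const_iterate, PySem.List.length_pyRange_one, hbcur]
            norm_num
          by_cases hx0 : x ≤ 0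
          · rw [if_pos hx0] at hchk
            obtain rfl := Option.some_inj.mp hchk
            rw [PySem.List.pyRange_one_eq_nil (by omega : x ≤ 0)] at haEq hbEq
            simp only [List.foldl_nil] at haEq hbEq
            rw [haEq, hbEq]
            exact ⟨hans, hacur, hbcur, hbdel, hbstk, hdb, hcc, Hll, hSR⟩
          · rw [if_neg hx0] at hchk
            by_cases hcur : 0 ≤ cur ∧ cur < n
            · rw [if_pos hcur] at hchk
              have hlive : cur ∉ del := by
                rcases hcc with h | h
                · omega
                · exact h.2.2
              have hch := chainDown n del sa.ll Hll cur hcur.1 hcur.2 hlive x.toNat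
              by_cases hle : x ≤ (liveBelow del cur).length
              · rw [if_pos hle] at hchk
                obtain rfl := Option.some_inj.mp hchk
                have hmle : x.toNat ≤ (liveBelow del cur).length := by omega
                obtain ⟨e1, e2, e3⟩ := hch (by omega)
                obtain ⟨q0, qn, qd, _⟩ := e3 hmle
                rw [haEq, hbEq]
                refine ⟨hans, ?_, ?_, hbdel, hbstk, hdb, ?_, Hll, hSR⟩
                · show (PySem.List.pyRange 0 x 1).foldl _ sa.cur = _
                  rw [hfoldA, e1, e2, if_neg (by omega), if_pos hmle]
                  congr 1
                  omega
                · show (PySem.List.pyRange 0 x 1).foldl _ sb.cur = _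
                  rw [hfoldB, e2, if_neg (by omega), if_pos hmle]
                  congr 1
                  omega
                · right
                  have hval : (liveBelow del cur).getD ((x - 1).toNat) (-1) = (fun q => prvL del q)^[x.toNat] cur := by
                    rw [e2, if_neg (by omega), if_pos hmle]
                    congr 1
                    omega
                  simp only [hval]
                  exact ⟨q0, qn, qd⟩
              · rw [if_neg hle] at hchk
                by_cases heq : x = (liveBelow del cur).length + 1
                · rw [if_pos heq] at hchk
                  obtain rfl := Option.some_inj.mp hchk
                  obtain ⟨e1, e2, _⟩ := hch (by omega)
                  rw [haEq, hbEq]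
                  refine ⟨hans, ?_, ?_, hbdel, hbstk, hdb, Or.inl rfl, Hll, hSR⟩
                  · show (PySem.List.pyRange 0 x 1).foldl _ sa.cur = _
                    rw [hfoldA, e1, e2, if_neg (by omega), if_neg (by omega)]
                  · show (PySem.List.pyRange 0 x 1).foldl _ sb.cur = _
                    rw [hfoldB, e2, if_neg (by omega), if_neg (by omega)]
                · rw [if_neg heq] at hchk
                  simp at hchk
            · rw [if_neg hcur] at hchk
              simp at hchk
      · by_cases hC : ch = 'C'
        · -- command C
          subst hC
          simp only [chkStep, hact] at hchk
          rw [if_neg (show ¬(('C' : Char) = 'D') by decide),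
              if_neg (show ¬(('C' : Char) = 'U') by decide)] at hchk
          by_cases hcond : 0 ≤ cur ∧ cur < n ∧ cur ∉ del
          · rw [if_pos hcond] at hchk
            obtain rfl := Option.some_inj.mp hchk
            exact stepC_inv n sa sb cur del stk hans hacur hbcur hbdel hbstk hdb Hll hSR
              hcond.1 hcond.2.1 hcond.2.2 c 'C' rest hact rfl
          · rw [if_neg hcond] at hchk
            simp at hchk
        · by_cases hZ : ch = 'Z'
          · -- command Z
            subst hZ
            simp only [chkStep, hact] at hchk
            rw [if_neg (show ¬(('Z' : Char) = 'D') by decide),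
                if_neg (show ¬(('Z' : Char) = 'U') by decide),
                if_neg (show ¬(('Z' : Char) = 'C') by decide)] at hchk
            cases hpop : PySem.List.pop? stk (-1) with
            | none => rw [hpop] at hchk; simp at hchk
            | some pr =>
              obtain ⟨idx, rest'⟩ := pr
              rw [hpop] at hchk
              simp only [] at hchk
              obtain rfl := Option.some_inj.mp hchk
              exact stepZ_inv n sa sb cur del stk hans hacur hbcur hbdel hbstk hdb hcc Hll hSR
                idx rest' hpop c 'Z' rest hact rfl
          · -- no-op command
            simp only [chkStep, hact] at hchk
            rw [if_neg hD, if_neg hU, if_neg hC, if_neg hZ] at hchk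
            obtain rfl := Option.some_inj.mp hchk
            have haEq : aStep sa c = sa := by
              unfold aStep
              rw [hact]
              simp [hD, hU, hC, hZ]
            have hbEq : bStep n sb c = sb := by
              unfold bStep
              rw [hact]
              simp [hD, hU, hC, hZ]
            rw [haEq, hbEq]
            exact ⟨hans, hacur, hbcur, hbdel, hbstk, hdb, hcc, Hll, hSR⟩


lemma run_eq (n : Int) (cmd : List String) : ∀ (sa : AState) (sb : BState) (st : Int × List Int × List Int),
    InvAB n sa sb st → chkRun n st cmd = true →
    (cmd.foldl aStep sa).ans = (cmd.foldl (bStep n) sb).ans := by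
  induction cmd with
  | nil => exact fun sa sb st hInv _ => hInv.1
  | cons c restc ih =>
    intro sa sb st hInv hrun
    unfold chkRun at hrun
    cases hstep : chkStep n st c with
    | none => rw [hstep] at hrun; simp at hrun
    | some st' =>
      rw [hstep] at hrun
      simp only [List.foldl_cons]
      exact ih (aStep sa c) (bStep n sb c) st' (step_inv n sa sb st st' hInv c hstep) hrun

lemma noopA (n : Int) (c : String) (sa : AState) (sb : BState)
    (h : (match c.toList with
          | [] => false
          | ch :: _ => !(ch = 'D' || ch = 'U' || ch = 'C' || ch = 'Z')) = true) :
    aStep sa c = sa ∧ bStep n sb c = sb := by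
  cases hact : c.toList with
  | nil => rw [hact] at h; simp at h
  | cons ch rest =>
    rw [hact] at h
    simp only [Bool.not_eq_true', Bool.or_eq_false_iff, decide_eq_false_iff_not] at h
    obtain ⟨⟨⟨h1, h2⟩, h3⟩, h4⟩ := h
    constructor
    · unfold aStep
      rw [hact]
      simp only [if_neg h1, if_neg h2, if_neg h3, if_neg h4]
    · unfold bStep
      rw [hact]
      simp only [if_neg h1, if_neg h2, if_neg h3, if_neg h4]

lemma noop_fold (n : Int) (cmd : List String) : ∀ (sa : AState) (sb : BState), noOps cmd = true →
    cmd.foldl aStep sa = sa ∧ cmd.foldl (bStep n) sb = sb := by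
  induction cmd with
  | nil => exact fun _ _ _ => ⟨rfl, rfl⟩
  | cons c restc ih =>
    intro sa sb h
    unfold noOps at h
    rw [List.all_cons, Bool.and_eq_true] at h
    obtain ⟨hstep1, hstep2⟩ := noopA n c sa sb h.1
    simp only [List.foldl_cons, hstep1, hstep2]
    exact ih sa sb h.2

lemma init_inv (n k : Int) (hk0 : 0 ≤ k) (hkn : k < n) :
    InvAB n ⟨PySem.List.pyRepeat ["O"] n, k, aInitLL n, []⟩
      ⟨PySem.List.pyRepeat ["O"] n, k, PySem.Set.empty, []⟩ (k, [], []) := by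
  refine ⟨rfl, rfl, rfl, rfl, rfl, ?_, ?_, ?_, ?_⟩
  · intro j hj
    exact absurd hj (List.not_mem_nil)
  · right
    exact ⟨hk0, hkn, List.not_mem_nil⟩
  · intro i h0 h1 _
    exact init_get? n i h0 h1
  · exact trivial

-- ===== VERDICT (by name: the statement is the Claim_ definition above) =====
theorem solution_spec : Claim_equal_solution := by
  unfold Claim_equal_solution
  intro n k cmd _ hpre
  unfold Spec_solution solution solution_alt
  rcases hpre with hno | ⟨_, hk0, hkn, hrun⟩
  · obtain ⟨h1, h2⟩ := noop_fold n cmd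
      ⟨PySem.List.pyRepeat ["O"] n, k, aInitLL n, []⟩
      ⟨PySem.List.pyRepeat ["O"] n, k, PySem.Set.empty, []⟩ hno
    rw [h1, h2]
  · rw [run_eq n cmd ⟨PySem.List.pyRepeat ["O"] n, k, aInitLL n, []⟩
      ⟨PySem.List.pyRepeat ["O"] n, k, PySem.Set.empty, []⟩ (k, [], [])
      (init_inv n k hk0 hkn) hrun]
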